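-- pv_equiv track=rewrite | github.com/kaluginpeter/Algorithms_and_structures_tasks | Python_Solutions/CodeWars/5kyu/Simple_Fun_166_Best_Match.py | best_match
-- ===== SOURCE A (Python) =====
-- def best_match(goals1, goals2):
--     idx, val, gol = 0, goals1[0] - goals2[0], goals2[0]
--     for i in range(1, len(goals1)):
--         if goals1[i] - goals2[i] < val:
--             idx, val, gol = i, goals1[i] - goals2[i], goals2[i]
--         elif goals1[i] - goals2[i] == val:
--             if gol >= goals2[i]:
--                 continue
--             idx, val, gol = i, goals1[i] - goals2[i], goals2[i]
--     return idx
-- ===== SOURCE B (Python) =====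
-- def best_match(goals1, goals2):
--     n = len(goals1)
--     diffs = [goals1[i] - goals2[i] for i in range(n)]
--     best_diff = min(diffs)
--     best_gol = max(goals2[i] for i in range(n) if diffs[i] == best_diff)
--     for i in range(n):
--         if diffs[i] == best_diff and goals2[i] == best_gol:
--             return i
-- ===== Notes on version B (the rewrite author's own statement) =====
-- stated objective: alternative
-- what changed: Replaces A's single one-pass scan with three accumulators by staged whole-list passes: materialize the difference list, take min(diffs) globally, take max of goals2 over the argmin set, then return the first index matching both values.
import Mathlib
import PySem

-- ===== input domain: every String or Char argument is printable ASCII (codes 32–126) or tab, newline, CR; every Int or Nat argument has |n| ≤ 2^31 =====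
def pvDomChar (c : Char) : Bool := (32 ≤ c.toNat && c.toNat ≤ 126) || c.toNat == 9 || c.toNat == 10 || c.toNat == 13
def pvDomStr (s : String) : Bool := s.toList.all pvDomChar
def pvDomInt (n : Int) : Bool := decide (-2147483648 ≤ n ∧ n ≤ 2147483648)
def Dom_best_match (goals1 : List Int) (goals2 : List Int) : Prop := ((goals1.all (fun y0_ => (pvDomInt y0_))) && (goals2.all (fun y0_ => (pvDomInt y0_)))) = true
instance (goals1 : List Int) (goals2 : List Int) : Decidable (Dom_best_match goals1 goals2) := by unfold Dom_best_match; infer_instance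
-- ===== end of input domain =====

-- B replaces A's single-pass three-accumulator scan by staged whole-list passes:
-- the difference list, its global minimum, the maximum of goals2 over the argmin
-- set, and the first index matching both (alternative decomposition, same cost).

-- ===== PORT A =====
def best_match (goals1 : List Int) (goals2 : List Int) : Int :=
  -- idx, val, gol = 0, goals1[0] - goals2[0], goals2[0]  (IndexError on empty lists is outside Pre_)
  let g1 : Int → Int := fun i => (PySem.List.pyGet? goals1 i).getD 0
  let g2 : Int → Int := fun i => (PySem.List.pyGet? goals2 i).getD 0
  let st :=
    (PySem.List.pyRange 1 goals1.length).foldl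
      (fun (s : Int × Int × Int) i =>
        let idx := s.1; let val := s.2.1; let gol := s.2.2
        if g1 i - g2 i < val then (i, g1 i - g2 i, g2 i)
        else if g1 i - g2 i = val then
          (if gol ≥ g2 i then (idx, val, gol) else (i, g1 i - g2 i, g2 i))
        else (idx, val, gol))
      (0, g1 0 - g2 0, g2 0)
  st.1

-- ===== PORT B =====
-- Staged passes, transliterating Source B: diffs = [goals1[i]-goals2[i] for i in range(n)]
-- (so diffs[i] is goals1[i]-goals2[i]); best_diff = min(diffs); best_gol =
-- max(goals2[i] for i in range(n) if diffs[i] == best_diff); then the first-return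
-- for loop is find?. min()/max() of an empty sequence raise ValueError; that path
-- (empty goals1) is outside Pre_, where the port's .getD 0 / none-branch defaults are unreachable.
def best_match_alt (goals1 : List Int) (goals2 : List Int) : Int :=
  let g1 : Int → Int := fun i => (PySem.List.pyGet? goals1 i).getD 0
  let g2 : Int → Int := fun i => (PySem.List.pyGet? goals2 i).getD 0
  let idxs := PySem.List.pyRange 0 goals1.length
  let diffs := idxs.map (fun i => g1 i - g2 i)
  let bestDiff := (PySem.List.min? diffs (fun x => x)).getD 0
  let bestGol := (PySem.List.max? ((idxs.filter (fun i => g1 i - g2 i == bestDiff)).map (fun i => g2 i)) (fun x => x)).getD 0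
  match idxs.find? (fun i => g1 i - g2 i == bestDiff && g2 i == bestGol) with
  | some i => i
  | none => 0

-- ===== PRECONDITION & SPEC =====
-- Pre_ excludes exactly the inputs where Python A raises IndexError: empty goals1,
-- or goals2 shorter than goals1 (B raises ValueError/IndexError there too).
def Pre_best_match (goals1 : List Int) (goals2 : List Int) : Prop :=
  goals1 ≠ [] ∧ goals1.length ≤ goals2.length
instance (goals1 : List Int) (goals2 : List Int) : Decidable (Pre_best_match goals1 goals2) := by
  unfold Pre_best_match; infer_instance
def pvWitness_best_match : List Int × List Int := ([3, 4, 3], [1, 4, 5])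

def Spec_best_match (goals1 : List Int) (goals2 : List Int) (out : Int) : Prop := out = best_match_alt goals1 goals2
instance (goals1 : List Int) (goals2 : List Int) (out : Int) : Decidable (Spec_best_match goals1 goals2 out) := by unfold Spec_best_match; infer_instance

-- ===== CLAIM (what is proved, stated in full; the proofs are below) =====
def Claim_equal_best_match : Prop := ∀ (goals1 : List Int) (goals2 : List Int), Dom_best_match goals1 goals2 → Pre_best_match goals1 goals2 → Spec_best_match goals1 goals2 (best_match goals1 goals2)

-- ===== LEMMAS AND PROOFS =====

-- The first index (in list order) attaining the lexicographically minimal key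
-- (d i, -(g i)); the common characterisation both programs are reduced to.
def pvFirstMin (d g : Int → Int) : List Int → Int
  | [] => 0
  | [a] => a
  | a :: b :: t =>
      if d (pvFirstMin d g (b :: t)) < d a ∨
         (d (pvFirstMin d g (b :: t)) = d a ∧ -(g (pvFirstMin d g (b :: t))) < -(g a))
      then pvFirstMin d g (b :: t) else a

-- A's three-accumulator fold tracks (idx, d idx, g idx) of the first-minimum fold.
theorem pv_fold_eq (d g : Int → Int) (l : List Int) :
    ∀ idx : Int,
      (l.foldl
        (fun (s : Int × Int × Int) i =>
          if d i < s.2.1 then (i, d i, g i)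
          else if d i = s.2.1 then
            (if s.2.2 ≥ g i then (s.1, s.2.1, s.2.2) else (i, d i, g i))
          else (s.1, s.2.1, s.2.2))
        (idx, d idx, g idx)).1
      =
      l.foldl
        (fun m i => if d i < d m ∨ (d i = d m ∧ -(g i) < -(g m)) then i else m)
        idx := by
  induction l with
  | nil => intro idx; rfl
  | cons i t ih =>
    intro idx
    simp only [List.foldl_cons]
    by_cases h1 : d i < d idx
    · rw [if_pos h1, if_pos (Or.inl h1)]
      exact ih i
    · by_cases h2 : d i = d idx
      · by_cases h4 : g idx ≥ g i
        · have h5 : ¬ (d i < d idx ∨ (d i = d idx ∧ -(g i) < -(g idx))) := by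
            rintro (h | ⟨-, h⟩) <;> omega
          rw [if_neg h1, if_pos h2, if_pos h4, if_neg h5]
          exact ih idx
        · have h5 : d i < d idx ∨ (d i = d idx ∧ -(g i) < -(g idx)) :=
            Or.inr ⟨h2, by omega⟩
          rw [if_neg h1, if_pos h2, if_neg h4, if_pos h5]
          exact ih i
      · have h5 : ¬ (d i < d idx ∨ (d i = d idx ∧ -(g i) < -(g idx))) := by
          rintro (h | ⟨h, -⟩) <;> [exact h1 h; exact h2 h]
        rw [if_neg h1, if_neg h2, if_neg h5]
        exact ih idx

-- Shifting the head through one fold step preserves the first minimum.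
theorem pv_firstMin_step (d g : Int → Int) (x i : Int) (t : List Int) :
    pvFirstMin d g (x :: i :: t)
      = pvFirstMin d g
          ((if d i < d x ∨ (d i = d x ∧ -(g i) < -(g x)) then i else x) :: t) := by
  cases t with
  | nil => simp [pvFirstMin]
  | cons c t' =>
    simp only [pvFirstMin]
    split_ifs <;> first | rfl | omega

-- The first-minimum fold computes pvFirstMin.
theorem pv_foldmin_eq_firstMin (d g : Int → Int) (t : List Int) :
    ∀ x : Int,
      t.foldl (fun m i => if d i < d m ∨ (d i = d m ∧ -(g i) < -(g m)) then i else m) x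
        = pvFirstMin d g (x :: t) := by
  induction t with
  | nil => intro x; rfl
  | cons i t ih =>
    intro x
    rw [List.foldl_cons, ih, ← pv_firstMin_step]

theorem pv_firstMin_mem (d g : Int → Int) (l : List Int) :
    ∀ a : Int, pvFirstMin d g (a :: l) ∈ a :: l := by
  induction l with
  | nil => intro a; simp [pvFirstMin]
  | cons b t ih =>
    intro a
    simp only [pvFirstMin]
    split_ifs with h
    · exact List.mem_cons_of_mem a (ih b)
    · exact List.mem_cons_self
  
theorem pv_firstMin_min (d g : Int → Int) (l : List Int) :
    ∀ a : Int, ∀ j ∈ a :: l,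
      d (pvFirstMin d g (a :: l)) < d j ∨
      (d (pvFirstMin d g (a :: l)) = d j ∧ g j ≤ g (pvFirstMin d g (a :: l))) := by
  induction l with
  | nil =>
    intro a j hj
    simp only [List.mem_singleton] at hj
    subst hj
    simp [pvFirstMin]
  | cons b t ih =>
    intro a j hj
    simp only [pvFirstMin]
    rw [List.mem_cons] at hj
    rcases hj with rfl | hj
    · split_ifs with h <;> omega
    · have := ih b j hj
      split_ifs with h <;> omega

theorem pv_find (d g : Int → Int) (V W : Int) (l : List Int) :
    ∀ a : Int,
      d (pvFirstMin d g (a :: l)) = V →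
      g (pvFirstMin d g (a :: l)) = W →
      (∀ j ∈ a :: l, V < d j ∨ (V = d j ∧ g j ≤ W)) →
      (a :: l).find? (fun i => d i == V && g i == W) = some (pvFirstMin d g (a :: l)) := by
  induction l with
  | nil =>
    intro a hV hW _
    simp only [pvFirstMin] at hV hW ⊢
    simp [List.find?, hV, hW]
  | cons b t ih =>
    intro a hV hW hmin
    simp only [pvFirstMin] at hV hW ⊢
    split_ifs at hV hW ⊢ with h
    · -- head a is not the first minimum: its key differs from (V, -W)
      have ha := hmin a List.mem_cons_self
      have hpa : (d a == V && g a == W) = false := by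
        rcases h with h' | ⟨h1, h2⟩
        · have : d a ≠ V := by omega
          simp [this]
        · have : g a ≠ W := by omega
          simp only [Bool.and_eq_false_iff, beq_eq_false_iff_ne, ne_eq]
          tauto
      rw [List.find?_cons_of_neg (by simp [hpa]), ih b hV hW
        (fun j hj => hmin j (List.mem_cons_of_mem a hj))]
    · exact List.find?_cons_of_pos (by simp [hV, hW])

-- B's staged passes also compute pvFirstMin on any nonempty index list.
theorem pv_staged_eq_firstMin (d g : Int → Int) (a : Int) (l : List Int) :
    (let diffs := (a :: l).map (fun i => d i)
     let bestDiff := (PySem.List.min? diffs (fun x => x)).getD 0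
     let bestGol := (PySem.List.max?
        (((a :: l).filter (fun i => d i == bestDiff)).map (fun i => g i)) (fun x => x)).getD 0
     match (a :: l).find? (fun i => d i == bestDiff && g i == bestGol) with
     | some i => i
     | none => 0) = pvFirstMin d g (a :: l) := by
  set M := pvFirstMin d g (a :: l) with hM
  have hmem : M ∈ a :: l := pv_firstMin_mem d g l a
  have hmin := pv_firstMin_min d g l a
  rw [← hM] at hmin
  -- the minimum of diffs is d M
  have hdiffs : ∃ v, PySem.List.min? ((a :: l).map (fun i => d i)) (fun x => x) = some v := by
    cases hv : PySem.List.min? ((a :: l).map (fun i => d i)) (fun x => x) with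
    | none => exact absurd ((PySem.List.min?_eq_none_iff _ _).mp hv) (by simp)
    | some v => exact ⟨v, rfl⟩
  obtain ⟨v, hv⟩ := hdiffs
  have hvM : v = d M := by
    have hvmem := PySem.List.min?_mem hv
    obtain ⟨j, hj, hjv⟩ := List.mem_map.mp hvmem
    have h1 : v ≤ d M := PySem.List.min?_isMin hv _ (List.mem_map_of_mem hmem)
    have h2 := hmin j hj
    omega
  -- the maximum of goals2 over the argmin set is g M
  have hMfil : M ∈ (a :: l).filter (fun i => d i == d M) := by
    exact List.mem_filter.mpr ⟨hmem, by simp⟩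
  have hgols : ∃ w, PySem.List.max?
      (((a :: l).filter (fun i => d i == d M)).map (fun i => g i)) (fun x => x) = some w := by
    cases hw : PySem.List.max? (((a :: l).filter (fun i => d i == d M)).map (fun i => g i))
        (fun x => x) with
    | none =>
      have := (PySem.List.max?_eq_none_iff _ _).mp hw
      rw [List.map_eq_nil_iff] at this
      rw [this] at hMfil
      exact absurd hMfil (List.not_mem_nil)
    | some w => exact ⟨w, rfl⟩
  obtain ⟨w, hw⟩ := hgols
  have hwM : w = g M := by
    have h1 : g M ≤ w := PySem.List.max?_isMax hw _ (List.mem_map_of_mem hMfil)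
    have hwmem := PySem.List.max?_mem hw
    obtain ⟨j, hj, hjw⟩ := List.mem_map.mp hwmem
    obtain ⟨hjmem, hjd⟩ := List.mem_filter.mp hj
    have hjd' : d j = d M := by simpa using hjd
    have h2 := hmin j hjmem
    omega
  simp only [hv, hvM, hw, hwM, Option.getD_some]
  rw [pv_find d g (d M) (g M) l a rfl rfl (fun j hj => by have := hmin j hj; omega)]

-- ===== VERDICT (by name: the statement is the Claim_ definition above) =====
theorem best_match_spec : Claim_equal_best_match := by
  intro goals1 goals2 _ hpre
  unfold Spec_best_match best_match best_match_alt
  have hn : (0 : Int) < goals1.length := by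
    have := hpre.1
    cases goals1 with
    | nil => exact absurd rfl this
    | cons a t => simp
  rw [PySem.List.pyRange_one_cons hn]
  simp only [zero_add]
  rw [pv_fold_eq (fun i => (PySem.List.pyGet? goals1 i).getD 0 - (PySem.List.pyGet? goals2 i).getD 0)
      (fun i => (PySem.List.pyGet? goals2 i).getD 0) (PySem.List.pyRange 1 goals1.length) 0,
    pv_foldmin_eq_firstMin, pv_staged_eq_firstMin]
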